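-- pv_equiv track=rewrite | github.com/Acmaro/CSC2541-Project | src/evaluation/scoring_v2.py | best_combinations
-- ===== SOURCE A (Python) =====
-- from itertools import combinations
--
-- def best_combinations(
--     hit_sets: dict[str, set[str]],
--     top_k:    int = 5,
-- ) -> list[tuple[tuple[str, ...], int]]:
--     """
--     Rank all 2- and 3-method combinations by total unique hit coverage.
--
--     The "baseline" key is excluded from combination search.
--
--     Returns:
--         List of (method_tuple, n_unique_hits) sorted by coverage descending.
--     """
--     methods = [m for m in hit_sets if m != "baseline"]
--     results = []
--     for r in (2, 3):
--         for combo in combinations(methods, r):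
--             union = set().union(*(hit_sets[m] for m in combo))
--             results.append((combo, len(union)))
--     return sorted(results, key=lambda x: x[1], reverse=True)[:top_k]
-- ===== SOURCE B (Python) =====
-- def pair_unions(hit_sets, methods):
--     """All ((a, b), union_of_a_b, tail-after-b) triples, recursing on the suffix.
--
--     The stored tail lets every 3-combination be produced by extending a
--     precomputed pair union with one later method, and the stored order
--     (pairs of the head first, then pairs of the tail) is exactly
--     itertools.combinations order."""
--     if not methods:
--         return []
--     a, rest = methods[0], methods[1:]
--     sa = hit_sets[a]
--     out = []
--     tail = rest
--     while tail:
--         b, tail = tail[0], tail[1:]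
--         out.append(((a, b), sa | hit_sets[b], tail))
--     return out + pair_unions(hit_sets, rest)
--
--
-- def best_combinations(hit_sets, top_k=5):
--     methods = [m for m in hit_sets if m != "baseline"]
--     pairs = pair_unions(hit_sets, methods)
--     results = [(c, len(u)) for (c, u, _) in pairs]
--     results += [(c + (x,), len(u | hit_sets[x]))
--                 for (c, u, rest) in pairs for x in rest]
--     results.sort(key=lambda x: -x[1])
--     return results[:top_k]
-- ===== Notes on version B (the rewrite author's own statement) =====
-- stated objective: alternative
-- what changed: Pairwise unions are computed once (with the tail of methods after each pair) and every 3-combination reuses its pair's precomputed union instead of rebuilding the whole union from scratch; the reverse sort is replaced by a stable ascending sort on the negated count.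
import Mathlib
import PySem

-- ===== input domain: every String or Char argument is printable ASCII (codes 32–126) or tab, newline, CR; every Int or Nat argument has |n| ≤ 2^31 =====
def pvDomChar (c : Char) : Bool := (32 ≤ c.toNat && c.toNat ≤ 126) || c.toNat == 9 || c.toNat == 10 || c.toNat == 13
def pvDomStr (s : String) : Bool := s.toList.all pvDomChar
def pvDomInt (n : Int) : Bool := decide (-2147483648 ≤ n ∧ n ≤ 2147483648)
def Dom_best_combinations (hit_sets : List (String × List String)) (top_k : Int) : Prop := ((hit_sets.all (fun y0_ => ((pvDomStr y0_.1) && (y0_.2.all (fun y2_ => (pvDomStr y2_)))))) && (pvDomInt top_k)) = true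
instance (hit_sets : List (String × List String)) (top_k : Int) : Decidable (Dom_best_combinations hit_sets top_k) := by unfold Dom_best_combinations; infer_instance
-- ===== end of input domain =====

-- B re-implements A with a different decomposition: pairwise unions are computed once and each
-- 3-combination reuses its pair's union, then a stable ascending sort on the negated count
-- replaces A's reverse sort; same return value (tie order included).

-- ===== PORT A =====
-- set().union(*(hit_sets[m] for m in combo))
def pvUnionOf (d : PySem.Dict String (List String)) (combo : List String) : PySem.Set String :=
  combo.foldl (fun u m => PySem.Set.union u (d.getD m [])) PySem.Set.empty

def best_combinations (hit_sets : List (String × List String)) (top_k : Int) : List (List String × Int) :=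
  let d := PySem.Dict.mk hit_sets
  let methods := d.keys.filter (fun m => m != "baseline")
  let results := [2, 3].foldl (fun res r =>
    (PySem.List.combinations methods r).foldl
      (fun res combo => res ++ [(combo, ((pvUnionOf d combo).length : Int))]) res) []
  PySem.List.slice (PySem.List.sorted results (fun x => x.2) true) none (some top_k)

-- ===== PORT B =====
-- the inner while-loop of pair_unions: pairs (a, b) with b drawn from xs, each with its union and tail
def pvInnerPairs (d : PySem.Dict String (List String)) (sa : PySem.Set String) (a : String) :
    List String → List (List String × PySem.Set String × List String)
  | [] => []
  | b :: tail => ([a, b], PySem.Set.union sa (d.getD b []), tail) :: pvInnerPairs d sa a tail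

-- pair_unions(hit_sets, methods)  (sa = hit_sets[a], a Python set, so its list is ported via Set.ofList)
def pvPairUnions (d : PySem.Dict String (List String)) :
    List String → List (List String × PySem.Set String × List String)
  | [] => []
  | a :: rest => pvInnerPairs d (PySem.Set.ofList (d.getD a [])) a rest ++ pvPairUnions d rest

def best_combinations_alt (hit_sets : List (String × List String)) (top_k : Int) : List (List String × Int) :=
  let d := PySem.Dict.mk hit_sets
  let methods := d.keys.filter (fun m => m != "baseline")
  let pairs := pvPairUnions d methods
  let results := pairs.map (fun p => (p.1, (p.2.1.length : Int)))
    ++ pairs.flatMap (fun p => p.2.2.map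
        (fun x => (p.1 ++ [x], ((PySem.Set.union p.2.1 (d.getD x [])).length : Int))))
  PySem.List.slice (PySem.List.sorted results (fun x => -x.2) false) none (some top_k)

-- ===== PRECONDITION & SPEC =====
def Spec_best_combinations (hit_sets : List (String × List String)) (top_k : Int) (out : List (List String × Int)) : Prop := out = best_combinations_alt hit_sets top_k
instance (hit_sets : List (String × List String)) (top_k : Int) (out : List (List String × Int)) : Decidable (Spec_best_combinations hit_sets top_k out) := by unfold Spec_best_combinations; infer_instance

-- ===== CLAIM (what is proved, stated in full; the proofs are below) =====
def Claim_equal_best_combinations : Prop := ∀ (hit_sets : List (String × List String)) (top_k : Int), Dom_best_combinations hit_sets top_k → Spec_best_combinations hit_sets top_k (best_combinations hit_sets top_k)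

-- ===== LEMMAS AND PROOFS =====

-- the 2-combination rows coming from one fixed first element a
theorem pvInnerPairs_map (d : PySem.Dict String (List String)) (sa : PySem.Set String) (a : String)
    (xs : List String) :
    (pvInnerPairs d sa a xs).map (fun p => (p.1, (p.2.1.length : Int)))
      = xs.map (fun b => (([a, b] : List String), ((PySem.Set.union sa (d.getD b [])).length : Int))) := by
  induction xs with
  | nil => rfl
  | cons b t ih => simp [pvInnerPairs, ih]

-- the 3-combination rows coming from one fixed first element a
theorem pvInnerPairs_flatMap (d : PySem.Dict String (List String)) (sa : PySem.Set String) (a : String)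
    (xs : List String) :
    (pvInnerPairs d sa a xs).flatMap (fun p => p.2.2.map
        (fun x => (p.1 ++ [x], ((PySem.Set.union p.2.1 (d.getD x [])).length : Int))))
      = (PySem.List.combinations xs 2).map
          (fun bc => (a :: bc, ((bc.foldl (fun u m => PySem.Set.union u (d.getD m [])) sa).length : Int))) := by
  induction xs with
  | nil => rfl
  | cons b t ih =>
    simp only [pvInnerPairs, List.flatMap_cons, ih,
      PySem.List.combinations_cons_succ, PySem.List.combinations_one, List.map_append,
      List.map_map]
    rfl

-- B's pair rows are A's 2-combination rows
theorem pvPairUnions_map (d : PySem.Dict String (List String)) (ms : List String) :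
    (pvPairUnions d ms).map (fun p => (p.1, (p.2.1.length : Int)))
      = (PySem.List.combinations ms 2).map (fun c => (c, ((pvUnionOf d c).length : Int))) := by
  induction ms with
  | nil => rfl
  | cons a t ih =>
    simp only [pvPairUnions, List.map_append, ih, pvInnerPairs_map,
      PySem.List.combinations_cons_succ, PySem.List.combinations_one, List.map_map]
    rfl

-- B's extended rows are A's 3-combination rows
theorem pvPairUnions_flatMap (d : PySem.Dict String (List String)) (ms : List String) :
    (pvPairUnions d ms).flatMap (fun p => p.2.2.map
        (fun x => (p.1 ++ [x], ((PySem.Set.union p.2.1 (d.getD x [])).length : Int))))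
      = (PySem.List.combinations ms 3).map (fun c => (c, ((pvUnionOf d c).length : Int))) := by
  induction ms with
  | nil => rfl
  | cons a t ih =>
    simp only [pvPairUnions, List.flatMap_append, ih, pvInnerPairs_flatMap,
      PySem.List.combinations_cons_succ, List.map_append, List.map_map]
    rfl

-- a stable ascending sort on the negated key is Python's reverse sort
theorem pv_sorted_neg (xs : List (List String × Int)) :
    PySem.List.sorted xs (fun x => x.2) true = PySem.List.sorted xs (fun x => -x.2) false := by
  rw [PySem.List.sorted_rev_eq_foldl_insertBy, PySem.List.sorted_eq_foldl_insertBy]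
  have h : (fun (a b : List String × Int) => decide ((fun x => -x.2) a < (fun x => -x.2) b))
      = (fun (a b : List String × Int) => decide ((fun x => x.2) b < (fun x => x.2) a)) := by
    funext a b
    simp only [decide_eq_decide]
    omega
  rw [h]

-- ===== VERDICT (by name: the statement is the Claim_ definition above) =====
theorem best_combinations_spec : Claim_equal_best_combinations := by
  intro hit_sets top_k _
  unfold Spec_best_combinations best_combinations best_combinations_alt
  simp only [List.foldl_cons, List.foldl_nil, PySem.List.foldl_append_singleton_eq_map,
    List.nil_append]
  rw [pvPairUnions_map, pvPairUnions_flatMap, pv_sorted_neg]
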